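-- pv_equiv track=rewrite | github.com/kjy00/Algorithm | 프로그래머스/3/12987. 숫자 게임/숫자 게임.py | solution
-- ===== SOURCE A (Python) =====
-- from collections import deque
--
-- def solution(A, B):
--     A.sort(reverse=True)
--     B.sort(reverse=True)
--     B = deque(B)
--     if A[-1] >= B[0]: return 0
--     answer = 0
--     a = 0
--     while len(B):
--         if A[a] < B[0]:
--             answer += 1
--             B.popleft()
--         elif A[a] >= B[0]:
--             B.pop()
--         a += 1
--     return answer
-- ===== SOURCE B (Python) =====
-- def solution(A, B):
--     A.sort(reverse=True)
--     B.sort(reverse=True)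
--     count = 0
--     i = min(len(A), len(B)) - 1
--     for b in reversed(B):
--         if i >= 0 and b > A[i]:
--             count += 1
--             i -= 1
--     return count
-- ===== Notes on version B (the rewrite author's own statement) =====
-- stated objective: simpler
-- what changed: Replaces the deque-based double-ended elimination loop (early-exit guard, walking A downward while popping a matched B from the left or a discarded B from the right) with a guard-free single backward two-pointer scan from the smallest elements that only counts matches.
-- crash fix: A raises IndexError when A or B is empty, or when len(A) < len(B) and some element of B exceeds min(A); B returns the greedy match count there (0 for empty inputs). — e.g. on solution([], []): A raises IndexError, B returns 0
import Mathlib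
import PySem

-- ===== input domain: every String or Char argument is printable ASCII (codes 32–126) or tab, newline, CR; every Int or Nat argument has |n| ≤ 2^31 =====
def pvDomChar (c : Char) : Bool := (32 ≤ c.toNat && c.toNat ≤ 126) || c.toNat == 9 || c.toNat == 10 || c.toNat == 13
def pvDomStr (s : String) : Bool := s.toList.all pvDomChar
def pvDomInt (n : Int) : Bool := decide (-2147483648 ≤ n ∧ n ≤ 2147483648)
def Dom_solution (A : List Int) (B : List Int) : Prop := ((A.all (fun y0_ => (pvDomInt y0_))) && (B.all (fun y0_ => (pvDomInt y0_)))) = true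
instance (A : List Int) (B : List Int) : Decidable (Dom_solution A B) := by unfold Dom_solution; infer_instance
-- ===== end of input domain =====

-- B replaces A's deque double-ended elimination loop by a guard-free backward two-pointer
-- scan; equal return values (both versions sort A and B in place, reverse=True, identically).

-- ===== PORT A =====
-- while len(B): compare A[a] with B's left end; pop left on a match, pop right otherwise.
def pvLoopA (As : List Int) : List Int → Nat → Int → Int
  | [], _, answer => answer
  | b :: rest, a, answer =>
    match As[a]? with
    | none => answer          -- Python: IndexError here (excluded by Pre_solution)
    | some av =>
      if av < b then pvLoopA As rest (a + 1) (answer + 1)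
      else pvLoopA As (List.dropLast (b :: rest)) (a + 1) answer
termination_by w => w.length
decreasing_by
  · simp
  · simp [List.length_dropLast]

def solution (A : List Int) (B : List Int) : Int :=
  match PySem.List.pyGet? (PySem.List.sorted A (fun x => x) true) (-1),
        PySem.List.pyGet? (PySem.List.sorted B (fun x => x) true) 0 with
  | some aLast, some b0 =>
    if aLast ≥ b0 then 0
    else pvLoopA (PySem.List.sorted A (fun x => x) true) (PySem.List.sorted B (fun x => x) true) 0 0
  | _, _ => 0                  -- Python: IndexError (A or B empty; excluded by Pre_solution)

-- ===== PORT B =====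
-- for b in reversed(B): if i >= 0 and b > A[i]: count += 1; i -= 1
-- (pyGetD is exact here: whenever Python evaluates A[i], 0 ≤ i < len(A))
def solution_alt (A : List Int) (B : List Int) : Int :=
  ((PySem.List.sorted B (fun x => x) true).reverse.foldl
    (fun (st : Int × Int) b =>
      if 0 ≤ st.1 ∧ PySem.List.pyGetD (PySem.List.sorted A (fun x => x) true) st.1 0 < b
      then (st.1 - 1, st.2 + 1) else st)
    (((min (PySem.List.sorted A (fun x => x) true).length
           (PySem.List.sorted B (fun x => x) true).length : Nat) : Int) - 1, 0)).2

-- ===== PRECONDITION & SPEC =====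
-- Pre_solution is exactly the set of inputs on which the Python A returns normally:
-- it raises IndexError iff A = [] or B = [], or len(A) < len(B) and the zero-guard does not fire.
def Pre_solution (A : List Int) (B : List Int) : Prop :=
  A ≠ [] ∧ B ≠ [] ∧ (B.length ≤ A.length ∨ ∀ a ∈ A, ∀ b ∈ B, b ≤ a)
instance (A : List Int) (B : List Int) : Decidable (Pre_solution A B) := by
  unfold Pre_solution; infer_instance

def pvWitness_solution : List Int × List Int := ([1, 5], [3, 4])

-- A raises IndexError when A or B is empty, or when len(A) < len(B) and some element of B
-- exceeds min(A); B returns the greedy match count there (0 for empty inputs).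
def Raises_solution (A : List Int) (B : List Int) : Prop :=
  A = [] ∨ B = [] ∨ (A.length < B.length ∧ ¬ ∀ a ∈ A, ∀ b ∈ B, b ≤ a)
instance (A : List Int) (B : List Int) : Decidable (Raises_solution A B) := by
  unfold Raises_solution; infer_instance
def pvRaiseWitness_solution : List Int × List Int := ([], [])
def pvRaiseWitnessOut_solution : Int := 0

def Spec_solution (A : List Int) (B : List Int) (out : Int) : Prop := out = solution_alt A B
instance (A : List Int) (B : List Int) (out : Int) : Decidable (Spec_solution A B out) := by
  unfold Spec_solution; infer_instance

-- ===== CLAIM (what is proved, stated in full; the proofs are below) =====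
def Claim_equal_solution : Prop := ∀ (A : List Int) (B : List Int), Dom_solution A B → Pre_solution A B → Spec_solution A B (solution A B)

def Claim_raises_solution : Prop := (∀ (A : List Int) (B : List Int), Dom_solution A B → Raises_solution A B → ¬ Pre_solution A B) ∧ (Dom_solution (pvRaiseWitness_solution.1) (pvRaiseWitness_solution.2) ∧ Raises_solution (pvRaiseWitness_solution.1) (pvRaiseWitness_solution.2) ∧ solution_alt (pvRaiseWitness_solution.1) (pvRaiseWitness_solution.2) = pvRaiseWitnessOut_solution)

-- ===== LEMMAS AND PROOFS =====

-- Ascending two-pointer greedy (B's loop, abstracted): scan the challengers W upward,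
-- a pointer list Z of still-unbeaten values in ascending order.
def tgreedy : List Int → List Int → Int
  | _, [] => 0
  | [], _ :: _ => 0
  | z :: Z, w :: W => if z < w then 1 + tgreedy Z W else tgreedy (z :: Z) W

-- A's loop, abstracted: descending lists, consume X's head each step; pop the matched
-- challenger from the front or the discarded one from the back.
def dgreedy : List Int → List Int → Int
  | _, [] => 0
  | [], _ :: _ => 0
  | x :: X, b :: B => if x < b then 1 + dgreedy X B else dgreedy X (List.dropLast (b :: B))
termination_by _ w => w.length
decreasing_by
  · simp
  · simp [List.length_dropLast]

lemma tgreedy_nil (W : List Int) : tgreedy [] W = 0 := by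
  cases W <;> simp [tgreedy]

lemma tgreedy_nil_right (Z : List Int) : tgreedy Z [] = 0 := by
  cases Z <;> simp [tgreedy]

lemma tgreedy_zero (W : List Int) : ∀ Z : List Int,
    (∀ w ∈ W, ∀ z ∈ Z, ¬ z < w) → tgreedy Z W = 0 := by
  induction W with
  | nil => intro Z _; cases Z <;> simp [tgreedy]
  | cons w W ih =>
    intro Z h
    cases Z with
    | nil => simp [tgreedy]
    | cons z Z =>
      have hzw : ¬ z < w := h w (by simp) z (by simp)
      simp only [tgreedy, if_neg hzw]
      exact ih (z :: Z) (fun w' hw' z' hz' => h w' (by simp [hw']) z' hz')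

-- appending a pair (a at the top of Z, b beating a) to both lists adds exactly one match
lemma tgreedy_append_pair (S : List Int) : ∀ (R : List Int) (a b : Int),
    a < b → (∀ r ∈ R, r ≤ a) → S.length ≤ R.length →
    tgreedy (R ++ [a]) (S ++ [b]) = tgreedy R S + 1 := by
  induction S with
  | nil =>
    intro R a b hab hR _
    induction R with
    | nil => simp [tgreedy, hab]
    | cons r R ihR =>
      have hra : r < b := lt_of_le_of_lt (hR r (by simp)) hab
      simp only [List.cons_append, List.nil_append, tgreedy, if_pos hra]
      simp
  | cons s S ih =>
    intro R a b hab hR hlen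
    cases R with
    | nil => simp at hlen
    | cons r R =>
      by_cases hrs : r < s
      · simp only [List.cons_append, tgreedy, if_pos hrs]
        rw [ih R a b hab (fun r' hr' => hR r' (by simp [hr'])) (by simpa using hlen)]
        omega
      · simp only [List.cons_append, tgreedy, if_neg hrs]
        have := ih (r :: R) a b hab hR (by simp at hlen ⊢; omega)
        simpa [List.cons_append] using this

-- appending an unbeatable value a at the top of Z changes nothing
lemma tgreedy_append_top (W : List Int) : ∀ (Z : List Int) (a : Int),
    (∀ w ∈ W, w ≤ a) → tgreedy (Z ++ [a]) W = tgreedy Z W := by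
  induction W with
  | nil => intro Z a _; simp [tgreedy_nil_right]
  | cons w W ih =>
    intro Z a hW
    cases Z with
    | nil =>
      have haw : ¬ a < w := not_lt.mpr (hW w (by simp))
      simp only [List.nil_append, tgreedy, if_neg haw]
      rw [show ([a] : List Int) = [] ++ [a] from rfl,
          ih [] a (fun w' hw' => hW w' (by simp [hw']))]
      simp [tgreedy_nil]
    | cons z Z =>
      by_cases hzw : z < w
      · simp only [List.cons_append, tgreedy, if_pos hzw]
        rw [ih Z a (fun w' hw' => hW w' (by simp [hw']))]
      · simp only [List.cons_append, tgreedy, if_neg hzw]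
        have := ih (z :: Z) a (fun w' hw' => hW w' (by simp [hw']))
        simpa [List.cons_append] using this

-- dropping the smallest challenger changes nothing when Z is short enough
lemma tgreedy_drop_min (W : List Int) : ∀ (Z : List Int) (w : Int),
    Z.length ≤ W.length → (∀ x ∈ W, w ≤ x) → W.Pairwise (· ≤ ·) →
    tgreedy Z (w :: W) = tgreedy Z W := by
  induction W with
  | nil =>
    intro Z w hlen _ _
    have : Z = [] := List.length_eq_zero_iff.mp (Nat.le_zero.mp hlen)
    subst this; simp [tgreedy_nil, tgreedy_nil_right]
  | cons w1 W ih =>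
    intro Z w hlen hW hpw
    cases Z with
    | nil => simp [tgreedy_nil]
    | cons z Z =>
      by_cases hzw : z < w
      · have hzw1 : z < w1 := lt_of_lt_of_le hzw (hW w1 (by simp))
        simp only [tgreedy, if_pos hzw, if_pos hzw1]
        have hW' : ∀ x ∈ W, w1 ≤ x := (List.pairwise_cons.mp hpw).1
        have hpw' : W.Pairwise (· ≤ ·) := (List.pairwise_cons.mp hpw).2
        rw [ih Z w1 (by simp at hlen ⊢; omega) hW' hpw']
      · simp only [tgreedy, if_neg hzw]

-- pvLoopA = dgreedy on the not-yet-visited suffix of As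
lemma pvLoopA_eq_dgreedy (n : Nat) : ∀ (Y X : List Int) (a : Nat) (acc : Int),
    Y.length = n → Y.length + a ≤ X.length →
    pvLoopA X Y a acc = acc + dgreedy (X.drop a) Y := by
  induction n with
  | zero =>
    intro Y X a acc hY _
    have : Y = [] := List.length_eq_zero_iff.mp hY
    subst this; simp [pvLoopA, dgreedy]
  | succ n ih =>
    intro Y X a acc hY hlen
    cases Y with
    | nil => simp at hY
    | cons b rest =>
      have ha : a < X.length := by simp at hY hlen; omega
      have hget : X[a]? = some X[a] := List.getElem?_eq_getElem ha
      have hdrop : X.drop a = X[a] :: X.drop (a + 1) := List.drop_eq_getElem_cons ha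
      by_cases hc : X[a] < b
      · simp only [pvLoopA, hget, if_pos hc]
        rw [ih rest X (a + 1) (acc + 1) (by simpa using hY) (by simp at hlen ⊢; omega)]
        rw [hdrop]
        simp only [dgreedy, if_pos hc]
        omega
      · simp only [pvLoopA, hget, if_neg hc]
        rw [ih (List.dropLast (b :: rest)) X (a + 1) acc
            (by simp [List.length_dropLast] at hY ⊢; omega)
            (by simp [List.length_dropLast] at hlen ⊢; omega)]
        rw [hdrop]
        simp only [dgreedy, if_neg hc]

-- the core equivalence: on descending sorted lists with |Y| ≤ |X|, A's double-ended greedy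
-- equals the ascending two-pointer greedy over the top |Y| values of X
lemma dgreedy_eq_tgreedy (n : Nat) : ∀ (Y X : List Int),
    Y.length = n → Y.length ≤ X.length →
    X.Pairwise (fun a b => b ≤ a) → Y.Pairwise (fun a b => b ≤ a) →
    dgreedy X Y = tgreedy ((X.take Y.length).reverse) Y.reverse := by
  induction n with
  | zero =>
    intro Y X hY _ _ _
    have : Y = [] := List.length_eq_zero_iff.mp hY
    subst this; simp [dgreedy, tgreedy]
  | succ n ih =>
    intro Y X hY hlen hX hY2
    cases Y with
    | nil => simp at hY
    | cons b Y' =>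
      cases X with
      | nil => simp at hlen
      | cons x X' =>
        have hn : Y'.length = n := by simpa using hY
        have hnX : n ≤ X'.length := by simp at hlen; omega
        have hX' : X'.Pairwise (fun a b => b ≤ a) := (List.pairwise_cons.mp hX).2
        have hxtop : ∀ y ∈ X', y ≤ x := (List.pairwise_cons.mp hX).1
        have hY' : Y'.Pairwise (fun a b => b ≤ a) := (List.pairwise_cons.mp hY2).2
        have hbtop : ∀ y ∈ Y', y ≤ b := (List.pairwise_cons.mp hY2).1
        have htake : ((x :: X').take (b :: Y').length).reverse
            = (X'.take n).reverse ++ [x] := by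
          simp [hn, List.take_succ_cons]
        by_cases hc : x < b
        · simp only [dgreedy, if_pos hc]
          rw [ih Y' X' hn (by omega) hX' hY']
          rw [htake, show (b :: Y').reverse = Y'.reverse ++ [b] by simp]
          rw [tgreedy_append_pair Y'.reverse (X'.take n).reverse x b hc
              (fun r hr => hxtop r (List.mem_of_mem_take (List.mem_reverse.mp hr)))
              (by simp [hn]; omega)]
          rw [hn]; omega
        · simp only [dgreedy, if_neg hc]
          have hbx : b ≤ x := not_lt.mp hc
          rw [ih (List.dropLast (b :: Y')) X'
              (by simp [List.length_dropLast]; omega)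
              (by simp [List.length_dropLast]; omega) hX'
              (hY2.sublist (List.dropLast_sublist _))]
          rw [htake]
          rw [tgreedy_append_top (b :: Y').reverse (X'.take n).reverse x
              (fun w hw => by
                have hw' : w ∈ b :: Y' := List.mem_reverse.mp hw
                rcases List.mem_cons.mp hw' with h | h
                · exact h ▸ hbx
                · exact le_trans (hbtop w h) hbx)]
          have hrevd : (List.dropLast (b :: Y')).reverse = ((b :: Y').reverse).tail := by
            rw [List.tail_reverse]
          rw [hrevd, show (List.dropLast (b :: Y')).length = n by
            simp [List.length_dropLast]; omega]
          have hrpw : ((b :: Y').reverse).Pairwise (fun a c => a ≤ c) := by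
            rw [List.pairwise_reverse]; exact hY2
          cases hrev : (b :: Y').reverse with
          | nil => exact absurd (congrArg List.length hrev) (by simp)
          | cons w W =>
            have hlenW : W.length = n := by
              have := congrArg List.length hrev; simp at this; omega
            have hWp := List.pairwise_cons.mp (hrev ▸ hrpw)
            simp only [List.tail_cons]
            rw [tgreedy_drop_min W ((X'.take n).reverse) w
                (by simp [hlenW]) hWp.1 hWp.2]

-- B's fold maintains (pointer i, count): count grows exactly as tgreedy over the
-- ascending list of the top (i+1) values of As
lemma foldB_eq_tgreedy (W : List Int) : ∀ (X : List Int) (i : Int) (c : Int),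
    -1 ≤ i → i < X.length →
    (W.foldl (fun (st : Int × Int) b =>
        if 0 ≤ st.1 ∧ PySem.List.pyGetD X st.1 0 < b
        then (st.1 - 1, st.2 + 1) else st) (i, c)).2
      = c + tgreedy ((X.take (i + 1).toNat).reverse) W := by
  induction W with
  | nil => intro X i c _ _; simp [tgreedy]
  | cons b W ih =>
    intro X i c h1 h2
    by_cases hi : 0 ≤ i
    · have hiN : i.toNat < X.length := by omega
      have hgd : PySem.List.pyGetD X i 0 = X[i.toNat] :=
        PySem.List.pyGetD_eq_getElem X 0 hi (by omega)
      have htake : (X.take (i + 1).toNat).reverse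
          = X[i.toNat] :: (X.take i.toNat).reverse := by
        rw [show (i + 1).toNat = i.toNat + 1 by omega, List.take_add_one,
            List.getElem?_eq_getElem hiN]
        simp
      by_cases hc : X[i.toNat] < b
      · simp only [List.foldl_cons, hgd, if_pos (And.intro hi hc)]
        rw [ih X (i - 1) (c + 1) (by omega) (by omega)]
        rw [htake, show (i - 1 + 1).toNat = i.toNat by omega]
        simp only [tgreedy, if_pos hc]
        omega
      · simp only [List.foldl_cons, hgd]
        rw [if_neg (by tauto)]
        rw [ih X i c h1 h2, htake]
        simp only [tgreedy, if_neg hc]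
    · have hi1 : i = -1 := by omega
      simp only [List.foldl_cons]
      rw [if_neg (by omega)]
      rw [ih X i c h1 h2, hi1]
      norm_num [tgreedy_nil]

-- minimum of a descending pairwise list bounds every element from below
lemma desc_getLast_le (l : List Int) (h : l ≠ [])
    (hp : l.Pairwise (fun a b => b ≤ a)) : ∀ x ∈ l, l.getLast h ≤ x := by
  induction l with
  | nil => exact absurd rfl h
  | cons a t ih =>
    intro x hx
    cases t with
    | nil => simp at hx; simp [hx, List.getLast]
    | cons b t' =>
      have hp' := List.pairwise_cons.mp hp
      rw [List.getLast_cons (by simp)]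
      rcases List.mem_cons.mp hx with h1 | h1
      · subst h1
        exact le_trans (ih (by simp) hp'.2 b (by simp)) (hp'.1 b (by simp))
      · exact ih (by simp) hp'.2 x h1

-- B's port, rewritten through the fold invariant
lemma alt_eq (A B : List Int) :
    solution_alt A B = tgreedy (((PySem.List.sorted A (fun x => x) true).take
        (min (PySem.List.sorted A (fun x => x) true).length
             (PySem.List.sorted B (fun x => x) true).length)).reverse)
      (PySem.List.sorted B (fun x => x) true).reverse := by
  unfold solution_alt
  rw [foldB_eq_tgreedy _ _ _ _ (by omega) (by push_cast; omega)]
  rw [zero_add,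
    show (((min (PySem.List.sorted A (fun x => x) true).length
           (PySem.List.sorted B (fun x => x) true).length : Nat) : Int) - 1 + 1).toNat
        = min (PySem.List.sorted A (fun x => x) true).length
           (PySem.List.sorted B (fun x => x) true).length from by omega]

-- ===== VERDICT (by name: the statement is the Claim_ definition above) =====
theorem solution_spec : Claim_equal_solution := by
  intro A B _ hPre
  obtain ⟨hA, hB, hcase⟩ := hPre
  unfold Spec_solution solution
  set As := PySem.List.sorted A (fun x => x) true with hAs
  set Bs := PySem.List.sorted B (fun x => x) true with hBs
  have hAsne : As ≠ [] := by
    intro h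
    exact hA (List.eq_nil_of_length_eq_zero (by
      rw [← PySem.List.length_sorted A (fun x => x) true, ← hAs, h]; rfl))
  have hBsne : Bs ≠ [] := by
    intro h
    exact hB (List.eq_nil_of_length_eq_zero (by
      rw [← PySem.List.length_sorted B (fun x => x) true, ← hBs, h]; rfl))
  have hApw : As.Pairwise (fun a b => b ≤ a) := by
    simpa using PySem.List.sorted_pairwise_rev A (fun x => x)
  have hBpw : Bs.Pairwise (fun a b => b ≤ a) := by
    simpa using PySem.List.sorted_pairwise_rev B (fun x => x)
  have hget1 : PySem.List.pyGet? As (-1) = some (As.getLast hAsne) := by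
    rw [PySem.List.pyGet?_neg_one, List.getLast?_eq_some_getLast]
  obtain ⟨b0, Bt, hBcons⟩ := List.exists_cons_of_ne_nil hBsne
  have hget2 : PySem.List.pyGet? Bs 0 = some b0 := by
    rw [PySem.List.pyGet?_zero, hBcons]; rfl
  have hmemAs : ∀ x : Int, x ∈ As ↔ x ∈ A := fun x =>
    PySem.List.mem_sorted A (fun x => x) true x
  have hmemBs : ∀ x : Int, x ∈ Bs ↔ x ∈ B := fun x =>
    PySem.List.mem_sorted B (fun x => x) true x
  have hlenA : As.length = A.length := PySem.List.length_sorted A (fun x => x) true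
  have hlenB : Bs.length = B.length := PySem.List.length_sorted B (fun x => x) true
  rw [hget1, hget2]
  show (if As.getLast hAsne ≥ b0 then (0 : Int) else pvLoopA As Bs 0 0) = solution_alt A B
  by_cases hguard : As.getLast hAsne ≥ b0
  · rw [if_pos hguard, alt_eq]
    rw [← hAs, ← hBs]
    refine (tgreedy_zero _ _ ?_).symm
    intro w hw z hz
    have hwBs : w ∈ Bs := List.mem_reverse.mp hw
    have hzAs : z ∈ As := List.mem_of_mem_take (List.mem_reverse.mp hz)
    have hwb0 : w ≤ b0 := by
      rcases List.mem_cons.mp (hBcons ▸ hwBs) with h | h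
      · exact h.le
      · exact (List.pairwise_cons.mp (hBcons ▸ hBpw)).1 w h
    have hzlast : As.getLast hAsne ≤ z := desc_getLast_le As hAsne hApw z hzAs
    omega
  · rw [if_neg hguard]
    have hlen : Bs.length ≤ As.length := by
      rcases hcase with h | h
      · omega
      · exfalso
        have : b0 ≤ As.getLast hAsne :=
          h (As.getLast hAsne) ((hmemAs _).mp (List.getLast_mem hAsne))
            b0 ((hmemBs _).mp (hBcons ▸ List.mem_cons_self))
        omega
    rw [pvLoopA_eq_dgreedy Bs.length Bs As 0 0 rfl (by omega)]
    rw [List.drop_zero,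
        dgreedy_eq_tgreedy Bs.length Bs As rfl hlen hApw hBpw]
    rw [alt_eq, ← hAs, ← hBs, Nat.min_eq_right hlen]
    omega

theorem solution_raises : Claim_raises_solution := by
  unfold Claim_raises_solution
  refine ⟨?_, by decide⟩
  intro A B _ hR hP
  obtain ⟨hA, hB, hcase⟩ := hP
  rcases hR with h | h | ⟨h1, h2⟩
  · exact hA h
  · exact hB h
  · rcases hcase with h | h
    · omega
    · exact h2 h

-- self-check: the raise-witness value asserted above is the one solution_raises proves
theorem pvRaiseWitnessValue_ok :
    solution_alt pvRaiseWitness_solution.1 pvRaiseWitness_solution.2 = pvRaiseWitnessOut_solution :=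
  solution_raises.2.2.2
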